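-- pv_equiv track=rewrite | github.com/architecture-building-systems/CityEnergyAnalyst | cea/visualisation/c_plotter.py | parse_plot_type
-- ===== SOURCE A (Python) =====
-- def parse_plot_type(plot_type_str):
--     """
--     Split a plot_type string like 'bar_plot_stack' into ('bar_plot', 'stack').
--
--     Returns:
--         plot_type (str), plot_mode (str)
--     """
--     valid_plot_types = {"bar_plot"}
--     valid_plot_modes = {"group", "stack", "stack_percentage"}
--
--     parts = plot_type_str.lower().split("_")
--
--     for i in range(1, len(parts) + 1):
--         plot_type_candidate = "_".join(parts[:i])
--         plot_mode_candidate = "_".join(parts[i:]) if i < len(parts) else None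
--
--         if plot_type_candidate in valid_plot_types:
--             if plot_mode_candidate in valid_plot_modes:
--                 return plot_type_candidate, plot_mode_candidate
--             else:
--                 return plot_type_candidate, None
--
--     return None, None  # Not recognized
-- ===== SOURCE B (Python) =====
-- def parse_plot_type(plot_type_str):
--     """Split a plot_type string like 'bar_plot_stack' into ('bar_plot', 'stack')."""
--     valid_plot_modes = {"group", "stack", "stack_percentage"}
--     low = plot_type_str.lower()
--     if low == "bar_plot":
--         return "bar_plot", None
--     if low.startswith("bar_plot_"):
--         mode = low[len("bar_plot_"):]
--         return "bar_plot", mode if mode in valid_plot_modes else None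
--     return None, None
-- ===== Notes on version B (the rewrite author's own statement) =====
-- stated objective: simpler
-- what changed: Replaces the split-on-underscore plus incremental join-and-index loop with a direct equality/prefix test against the single valid type and one slice for the mode.
import Mathlib
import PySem

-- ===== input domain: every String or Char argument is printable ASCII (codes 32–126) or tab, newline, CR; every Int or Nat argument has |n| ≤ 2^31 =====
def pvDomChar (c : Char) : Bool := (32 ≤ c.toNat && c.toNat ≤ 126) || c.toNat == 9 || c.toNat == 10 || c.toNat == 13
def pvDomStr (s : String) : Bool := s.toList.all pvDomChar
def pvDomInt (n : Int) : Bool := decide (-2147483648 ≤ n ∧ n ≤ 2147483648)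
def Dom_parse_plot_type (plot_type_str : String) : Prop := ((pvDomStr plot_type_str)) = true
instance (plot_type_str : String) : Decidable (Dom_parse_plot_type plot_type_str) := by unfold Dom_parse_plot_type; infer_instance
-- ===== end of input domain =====

-- B replaces A's split-on-underscore + incremental join-and-index loop by a direct equality/prefix
-- test against the single valid plot type (objective: simpler).


-- ===== PORT A =====
-- valid_plot_types / valid_plot_modes: Python set literals of strings (strings held as List Char)
def pvTypeSet : PySem.Set (List Char) := PySem.Set.ofList ["bar_plot".toList]
def pvModeSet : PySem.Set (List Char) := PySem.Set.ofList ["group".toList, "stack".toList, "stack_percentage".toList]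

-- A's 'for i in range(1, len(parts)+1)' loop with its early returns; i ≥ 1 throughout,
-- so the Python slices parts[:i] / parts[i:] are exactly take/drop of i.toNat.
def pvLoopA (parts : List (List Char)) : List Int → Option String × Option String
  | [] => (none, none)
  | i :: rest =>
    let cand := PySem.Chars.join ['_'] (parts.take i.toNat)
    let modeCand : Option (List Char) :=
      if i < (parts.length : Int) then some (PySem.Chars.join ['_'] (parts.drop i.toNat)) else none
    if pvTypeSet.contains cand then
      -- 'plot_mode_candidate in valid_plot_modes': None is never in a set of strings
      if (match modeCand with | some mc => pvModeSet.contains mc | none => false) then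
        (some (String.ofList cand), modeCand.map String.ofList)
      else (some (String.ofList cand), none)
    else pvLoopA parts rest

def parse_plot_type (plot_type_str : String) : Option String × Option String :=
  let parts := PySem.Chars.splitOn (PySem.Chars.lower plot_type_str.toList) ['_']
  pvLoopA parts (PySem.List.pyRange 1 (parts.length + 1) 1)

-- ===== PORT B =====
def parse_plot_type_alt (plot_type_str : String) : Option String × Option String :=
  let low := PySem.Chars.lower plot_type_str.toList
  if low = "bar_plot".toList then (some "bar_plot", none)
  else if PySem.Chars.startswith low "bar_plot_".toList then
    let mode := low.drop 9  -- low[len("bar_plot_"):]: slice with nonnegative start = drop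
    (some "bar_plot", if pvModeSet.contains mode then some (String.ofList mode) else none)
  else (none, none)


-- ===== PRECONDITION & SPEC =====
def Spec_parse_plot_type (plot_type_str : String) (out : Option String × Option String) : Prop := out = parse_plot_type_alt plot_type_str
instance (plot_type_str : String) (out : Option String × Option String) : Decidable (Spec_parse_plot_type plot_type_str out) := by unfold Spec_parse_plot_type; infer_instance

-- ===== CLAIM (what is proved, stated in full; the proofs are below) =====
def Claim_equal_parse_plot_type : Prop := ∀ (plot_type_str : String), Dom_parse_plot_type plot_type_str → Spec_parse_plot_type plot_type_str (parse_plot_type plot_type_str)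

-- ===== LEMMAS AND PROOFS =====

lemma pvLoopNone (parts : List (List Char)) : ∀ is : List Int,
    (∀ i ∈ is, PySem.Chars.join ['_'] (parts.take i.toNat) ≠ "bar_plot".toList) →
    pvLoopA parts is = (none, none) := by
  intro is
  induction is with
  | nil => intro _; simp [pvLoopA]
  | cons i rest ih =>
    intro h
    rw [pvLoopA, if_neg]
    · exact ih (fun j hj => h j (List.mem_cons_of_mem _ hj))
    · rw [pvTypeSet, PySem.Set.contains_iff, PySem.Set.mem_ofList]
      simpa using h i List.mem_cons_self

lemma pvGo (fuel : Nat) : ∀ (l cur : List Char) (acc : List (List Char)), l.length < fuel →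
    PySem.Chars.splitOn.go ['_'] fuel l cur acc = acc.reverse ++ (List.splitOn '_' l).modifyHead (cur.reverse ++ ·) := by
  induction fuel with
  | zero => intro l cur acc h; omega
  | succ n ih =>
    intro l cur acc h
    match l with
    | [] =>
      rw [PySem.Chars.splitOn.go]
      · simp [List.splitOn_nil]
      · omega
    | c :: rest =>
      rw [PySem.Chars.splitOn.go]
      by_cases hc : c = '_'
      · subst hc
        have hp : (['_'] : List Char).isPrefixOf ('_' :: rest) = true := by simp [List.isPrefixOf]
        rw [if_pos hp, show List.drop (['_'] : List Char).length ('_' :: rest) = rest from rfl]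
        rw [ih rest [] _ (by simpa using Nat.lt_of_succ_lt_succ h)]
        have h2 : List.splitOn '_' ('_' :: rest) = [] :: List.splitOn '_' rest := by
          simp [List.splitOn, List.splitOnP_cons]
        rw [h2]
        rcases hsr : List.splitOn '_' rest with _ | ⟨hh, tt⟩
        · exact absurd hsr (List.splitOnP_ne_nil _ _)
        · simp
      · have hp : (['_'] : List Char).isPrefixOf (c :: rest) = false := by
          simp [List.isPrefixOf]; exact fun hx => absurd hx.symm hc
        rw [if_neg (by simp [hp])]
        rw [ih rest (c :: cur) acc (by simpa using Nat.lt_of_succ_lt_succ h)]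
        have h2 : List.splitOn '_' (c :: rest) = (List.splitOn '_' rest).modifyHead (c :: ·) := by
          simp [List.splitOn, List.splitOnP_cons, hc]
        rw [h2]
        rcases hsr : List.splitOn '_' rest with _ | ⟨hh, tt⟩
        · exact absurd hsr (List.splitOnP_ne_nil _ _)
        · simp

lemma pvSplit (l : List Char) : PySem.Chars.splitOn l ['_'] = List.splitOn '_' l := by
  rw [PySem.Chars.splitOn, pvGo (l.length + 1) l [] [] (by omega)]
  rcases hsr : List.splitOn '_' l with _ | ⟨hh, tt⟩
  · exact absurd hsr (List.splitOnP_ne_nil _ _)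
  · simp

lemma pvInterCons2 (x y : List Char) (yt : List (List Char)) :
    (['_'] : List Char).intercalate (x :: y :: yt) = x ++ '_' :: ['_'].intercalate (y :: yt) := by
  simp [List.intercalate]

lemma pvInterSingle (x : List Char) : (['_'] : List Char).intercalate [x] = x := by
  simp [List.intercalate]

lemma pvInter (xs : List (List Char)) : ∀ (ys : List (List Char)), xs ≠ [] → ys ≠ [] →
    (['_'] : List Char).intercalate (xs ++ ys) = ['_'].intercalate xs ++ '_' :: ['_'].intercalate ys := by
  induction xs with
  | nil => intro ys h _; exact absurd rfl h
  | cons x xt ih =>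
    intro ys _ hy
    match xt with
    | [] =>
      rcases ys with _ | ⟨y, yt⟩
      · exact absurd rfl hy
      · rw [List.singleton_append, pvInterCons2, pvInterSingle]
    | x2 :: xt2 =>
      rw [List.cons_append, List.cons_append, pvInterCons2, pvInterCons2,
        show x2 :: (xt2 ++ ys) = (x2 :: xt2) ++ ys from rfl, ih ys (by simp) hy]
      simp

lemma pvTakeDrop (ps : List (List Char)) (i : Nat) (h1 : 1 ≤ i) (h2 : i < ps.length) :
    (['_'] : List Char).intercalate ps = ['_'].intercalate (ps.take i) ++ '_' :: ['_'].intercalate (ps.drop i) := by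
  conv_lhs => rw [← List.take_append_drop i ps]
  exact pvInter _ _ (List.ne_nil_of_length_pos (by simp; omega))
    (List.ne_nil_of_length_pos (by simp; omega))

lemma pvSplitBP (m : List Char) :
    List.splitOn '_' ("bar_plot_".toList ++ m) = ['b','a','r'] :: ['p','l','o','t'] :: List.splitOn '_' m := by
  simp [List.splitOn, List.splitOnP_cons]

lemma pvLoopBP (ps : List (List Char)) (hk : ps ≠ []) (rest : List Int) :
    pvLoopA (['b','a','r'] :: ['p','l','o','t'] :: ps) (1 :: 2 :: rest)
      = (some "bar_plot",
         if pvModeSet.contains ((['_'] : List Char).intercalate ps)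
         then some (String.ofList ((['_'] : List Char).intercalate ps)) else none) := by
  have hlen : 0 < ps.length := List.length_pos_of_ne_nil hk
  simp only [pvLoopA]
  have h2 : (2:Int) ≤ (ps.length : Int) + 1 := by omega
  norm_num [PySem.Chars.join, List.intercalate, pvTypeSet, pvModeSet, PySem.Set.mem_ofList, h2,
    show ((2:Int)).toNat = 2 from rfl,
    show ("bar_plot".toList) = ['b','a','r','_','p','l','o','t'] from by decide]
  rw [if_neg (by decide)]
  have hbp : String.ofList ['b','a','r','_','p','l','o','t'] = "bar_plot" := by decide
  split_ifs <;> simp [hbp]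

theorem pv_main (s : String) : parse_plot_type s = parse_plot_type_alt s := by
  simp only [parse_plot_type, parse_plot_type_alt, pvSplit]
  generalize PySem.Chars.lower s.toList = low
  by_cases h1 : low = "bar_plot".toList
  · subst h1; decide
  · rw [if_neg h1]
    by_cases h2 : "bar_plot_".toList <+: low
    · obtain ⟨m, rfl⟩ := h2
      rw [if_pos (by rw [PySem.Chars.startswith_iff]; exact ⟨m, rfl⟩), pvSplitBP]
      have hk : List.splitOn '_' m ≠ [] := List.splitOnP_ne_nil _ _
      have hlen : (['b','a','r'] :: ['p','l','o','t'] :: List.splitOn '_' m).length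
          = (List.splitOn '_' m).length + 2 := by simp
      have hrange : PySem.List.pyRange 1 ((['b','a','r'] :: ['p','l','o','t'] :: List.splitOn '_' m).length + 1) 1
          = 1 :: 2 :: PySem.List.pyRange 3 ((['b','a','r'] :: ['p','l','o','t'] :: List.splitOn '_' m).length + 1) 1 := by
        rw [PySem.List.pyRange_one_cons (by rw [hlen]; push_cast; omega),
          PySem.List.pyRange_one_cons (by rw [hlen]; push_cast; omega)]
        norm_num
      rw [hrange, pvLoopBP _ hk]
      rw [List.intercalate_splitOn m '_']
      rw [show ("bar_plot_".toList ++ m).drop 9 = m from by simp]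
    · rw [if_neg (by rw [PySem.Chars.startswith_iff]; exact h2)]
      apply pvLoopNone
      intro i hi heq
      rw [PySem.List.mem_pyRange_one] at hi
      rw [PySem.Chars.join] at heq
      by_cases hj : (List.splitOn '_' low).length ≤ i.toNat
      · rw [List.take_of_length_le hj, List.intercalate_splitOn] at heq
        exact h1 heq
      · have hlow := pvTakeDrop (List.splitOn '_' low) i.toNat (by omega) (by omega)
        rw [heq, List.intercalate_splitOn] at hlow
        refine h2 ⟨(['_'] : List Char).intercalate (List.drop i.toNat (List.splitOn '_' low)), ?_⟩
        conv_rhs => rw [hlow]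
        rfl

-- ===== VERDICT (by name: the statement is the Claim_ definition above) =====
theorem parse_plot_type_spec : Claim_equal_parse_plot_type := by
  intro s _
  exact pv_main s
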